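-- pv_equiv track=rewrite | github.com/TasyaBelka/Python-Clyde-College- | Final/task_2.py | GetGradeMark
-- ===== SOURCE A (Python) =====
-- def GetGradeMark(list):
--   markList = []
--   for grade in list:
--
--     if(grade >= 70):
--       markList.append('A')
--
--     elif(grade >= 60 and grade < 70):
--       markList.append('B')
--
--     elif(grade >= 50 and grade < 60):
--       markList.append('C')
--
--     elif(grade >= 45 and grade < 50):
--       markList.append('D')
--
--     else:
--       markList.append('No Grade')
--   return markList
-- ===== SOURCE B (Python) =====
-- def GetGradeMark(list):
--   thresholds = [45, 50, 60, 70]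
--   marks = ['No Grade', 'D', 'C', 'B', 'A']
--   def idx(g):
--     lo, hi = 0, 4
--     while lo < hi:
--       mid = (lo + hi) // 2
--       if g < thresholds[mid]:
--         hi = mid
--       else:
--         lo = mid + 1
--     return lo
--   return [marks[idx(g)] for g in list]
-- ===== Notes on version B (the rewrite author's own statement) =====
-- stated objective: idiomatic
-- what changed: Replaced the per-grade if/elif threshold cascade with a thresholds table plus a hand-written bisect_right binary search indexing into a parallel marks table, mapped over the list.
import Mathlib
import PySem

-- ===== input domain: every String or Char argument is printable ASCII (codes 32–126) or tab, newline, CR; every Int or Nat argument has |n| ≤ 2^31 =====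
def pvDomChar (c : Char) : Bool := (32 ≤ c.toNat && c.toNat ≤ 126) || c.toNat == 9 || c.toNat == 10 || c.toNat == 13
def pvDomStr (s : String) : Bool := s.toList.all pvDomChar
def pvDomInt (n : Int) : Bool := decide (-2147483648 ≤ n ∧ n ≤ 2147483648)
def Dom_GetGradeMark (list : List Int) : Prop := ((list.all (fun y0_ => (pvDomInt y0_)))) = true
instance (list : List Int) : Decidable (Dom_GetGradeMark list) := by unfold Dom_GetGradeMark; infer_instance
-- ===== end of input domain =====

-- B replaces A's if/elif cascade by a thresholds table + binary-search (bisect_right) lookup into a parallel marks table; idiomatic, same cost.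

-- ===== PORT A =====
def GetGradeMark (list : List Int) : List String :=
  list.foldl (fun markList grade =>
    if grade ≥ 70 then markList ++ ["A"]
    else if grade ≥ 60 ∧ grade < 70 then markList ++ ["B"]
    else if grade ≥ 50 ∧ grade < 60 then markList ++ ["C"]
    else if grade ≥ 45 ∧ grade < 50 then markList ++ ["D"]
    else markList ++ ["No Grade"]) []

-- ===== PORT B =====
def pvThresholds : List Int := [45, 50, 60, 70]
def pvMarks : List String := ["No Grade", "D", "C", "B", "A"]

-- the while-loop of Source B's idx; fuel = hi - lo bounds the iterations (each step shrinks the interval)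
def pvBisectAux (g : Int) : Nat → Nat → Nat → Nat
  | 0, lo, _ => lo
  | fuel + 1, lo, hi =>
    if lo < hi then
      let mid := (lo + hi) / 2
      if g < pvThresholds.getD mid 0 then pvBisectAux g fuel lo mid
      else pvBisectAux g fuel (mid + 1) hi
    else lo

def pvBisect (g : Int) (lo hi : Nat) : Nat := pvBisectAux g (hi - lo) lo hi

def GetGradeMark_alt (list : List Int) : List String :=
  list.map (fun g => pvMarks.getD (pvBisect g 0 4) "")

-- ===== PRECONDITION & SPEC =====
def Spec_GetGradeMark (list : List Int) (out : List String) : Prop := out = GetGradeMark_alt list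
instance (list : List Int) (out : List String) : Decidable (Spec_GetGradeMark list out) := by unfold Spec_GetGradeMark; infer_instance

-- ===== CLAIM (what is proved, stated in full; the proofs are below) =====
def Claim_equal_GetGradeMark : Prop := ∀ (list : List Int), Dom_GetGradeMark list → Spec_GetGradeMark list (GetGradeMark list)

-- ===== LEMMAS AND PROOFS =====

-- closed characterisation of the binary search on the 4-entry table
theorem pvBisect_eval (g : Int) :
    pvBisect g 0 4 = if g < 45 then 0 else if g < 50 then 1 else if g < 60 then 2 else if g < 70 then 3 else 4 := by
  by_cases h45 : g < 45 <;> by_cases h50 : g < 50 <;> by_cases h60 : g < 60 <;> by_cases h70 : g < 70 <;>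
    first
      | omega
      | simp [pvBisect, pvBisectAux, pvThresholds, h45, h50, h60, h70]

-- per-grade agreement of A's cascade with B's table lookup
theorem pv_mark_eq (g : Int) :
    (if g ≥ 70 then "A"
     else if g ≥ 60 ∧ g < 70 then "B"
     else if g ≥ 50 ∧ g < 60 then "C"
     else if g ≥ 45 ∧ g < 50 then "D"
     else "No Grade") = pvMarks.getD (pvBisect g 0 4) "" := by
  rw [pvBisect_eval]
  split_ifs <;> simp [pvMarks] <;> omega

-- A's foldl-with-append equals B's map, for any accumulator
theorem pv_foldl_map (l : List Int) (acc : List String) :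
    l.foldl (fun markList grade =>
      if grade ≥ 70 then markList ++ ["A"]
      else if grade ≥ 60 ∧ grade < 70 then markList ++ ["B"]
      else if grade ≥ 50 ∧ grade < 60 then markList ++ ["C"]
      else if grade ≥ 45 ∧ grade < 50 then markList ++ ["D"]
      else markList ++ ["No Grade"]) acc
    = acc ++ l.map (fun g => pvMarks.getD (pvBisect g 0 4) "") := by
  induction l generalizing acc with
  | nil => simp
  | cons g t ih =>
    simp only [List.foldl_cons, List.map_cons]
    rw [ih]
    have h := pv_mark_eq g
    split_ifs at h ⊢ <;> simp [List.getD] at h ⊢ <;> simp [h]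

-- ===== VERDICT (by name: the statement is the Claim_ definition above) =====
theorem GetGradeMark_spec : Claim_equal_GetGradeMark := by
  intro list _
  unfold Spec_GetGradeMark GetGradeMark GetGradeMark_alt
  simpa using pv_foldl_map list []
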